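-- pv_equiv track=rewrite | github.com/liujuanjuan1984/a2a-client-hub | backend/app/integrations/a2a_client/validators.py | _format_proto_path
-- ===== SOURCE A (Python) =====
-- def _format_proto_path(parts: tuple[str, ...]) -> str:
--     if not parts:
--         return ""
--     formatted: list[str] = []
--     for part in parts:
--         if part.startswith("[") and formatted:
--             formatted[-1] = f"{formatted[-1]}{part}"
--             continue
--         formatted.append(part)
--     return ".".join(formatted)
-- ===== SOURCE B (Python) =====
-- def _format_proto_path(parts: tuple[str, ...]) -> str:
--     # Build the output back-to-front: walk the parts right-to-left, emitting each
--     # part preceded (on its right!) by a "." separator exactly when the neighbouring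
--     # part to the right (the last one processed) does not start with "[", then
--     # reverse the emitted pieces and concatenate.
--     pieces = []
--     right_bracket = None
--     for part in reversed(parts):
--         if right_bracket is not None and not right_bracket:
--             pieces.append(".")
--         pieces.append(part)
--         right_bracket = part.startswith("[")
--     return "".join(reversed(pieces))
-- ===== Notes on version B (the rewrite author's own statement) =====
-- stated objective: alternative
-- what changed: B builds the output back-to-front: it iterates the parts in reverse, emitting each part preceded by a '.' piece exactly when the already-emitted right neighbour does not start with '[' (carried in a flag), then reverses the pieces and concatenates with ''.join — instead of A's forward pass that builds a list, mutates its last element to merge bracket suffixes, and joins with '.'.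
import Mathlib
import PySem

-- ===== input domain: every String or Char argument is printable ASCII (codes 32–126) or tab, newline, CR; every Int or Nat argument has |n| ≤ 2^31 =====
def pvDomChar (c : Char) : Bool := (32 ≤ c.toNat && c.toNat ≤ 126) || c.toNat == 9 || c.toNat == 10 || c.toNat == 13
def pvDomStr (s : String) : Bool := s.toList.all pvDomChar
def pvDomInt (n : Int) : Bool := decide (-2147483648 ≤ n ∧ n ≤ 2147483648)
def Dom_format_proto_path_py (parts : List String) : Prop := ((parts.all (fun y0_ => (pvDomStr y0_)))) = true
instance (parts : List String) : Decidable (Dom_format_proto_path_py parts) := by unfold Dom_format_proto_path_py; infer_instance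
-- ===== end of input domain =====

-- B builds the output back-to-front: reverse traversal emitting pieces whose separator is
-- chosen from the right neighbour's bracket flag, then reverse-and-concatenate, instead of
-- A's forward list-build with last-element mutation and "."-join (objective: alternative).

-- ===== PORT A =====
def format_proto_path_py (parts : List String) : String :=
  if parts.isEmpty then ""
  else
    let formatted : List String := parts.foldl (fun formatted part =>
      if PySem.Str.startswith part "[" && !formatted.isEmpty then
        formatted.dropLast ++ [formatted.getLast! ++ part]
      else
        formatted ++ [part]) []
    PySem.Str.join "." formatted

-- ===== PORT B =====
def format_proto_path_py_alt (parts : List String) : String :=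
  let st := parts.reverse.foldl
    (fun (st : List String × Option Bool) part =>
      let pieces := match st.2 with
        | some false => st.1 ++ ["."]
        | _ => st.1
      (pieces ++ [part], some (PySem.Str.startswith part "[")))
    ([], none)
  PySem.Str.join "" st.1.reverse

-- ===== PRECONDITION & SPEC =====
def Spec_format_proto_path_py (parts : List String) (out : String) : Prop := out = format_proto_path_py_alt parts
instance (parts : List String) (out : String) : Decidable (Spec_format_proto_path_py parts out) := by unfold Spec_format_proto_path_py; infer_instance

-- ===== CLAIM (what is proved, stated in full; the proofs are below) =====
def Claim_equal_format_proto_path_py : Prop := ∀ (parts : List String), Dom_format_proto_path_py parts → Spec_format_proto_path_py parts (format_proto_path_py parts)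

-- ===== LEMMAS AND PROOFS =====

-- canonical form both programs are reduced to: head ++ (each later part prefixed by "." unless it starts with "[")
def sepTail : List String → String
  | [] => ""
  | y :: t => (if PySem.Str.startswith y "[" then y else "." ++ y) ++ sepTail t

theorem sj_singleton (a : String) : PySem.Str.join "." [a] = a := by
  rw [← String.toList_inj]
  simp [PySem.Str.toList_join, PySem.Chars.join_singleton]

theorem sj_cons_cons (a b : String) (t : List String) :
    PySem.Str.join "." (a :: b :: t) = a ++ "." ++ PySem.Str.join "." (b :: t) := by
  rw [← String.toList_inj]
  simp [PySem.Str.toList_join, PySem.Chars.join_cons_cons]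

theorem sj_cons (a : String) (l : List String) (h : l ≠ []) :
    PySem.Str.join "." (a :: l) = a ++ "." ++ PySem.Str.join "." l := by
  cases l with
  | nil => exact absurd rfl h
  | cons b t => exact sj_cons_cons a b t

-- A's loop step
def stepA (formatted : List String) (part : String) : List String :=
  if PySem.Str.startswith part "[" && !formatted.isEmpty then
    formatted.dropLast ++ [formatted.getLast! ++ part]
  else
    formatted ++ [part]

theorem stepA_ne_nil (acc : List String) (part : String) (_ : acc ≠ []) :
    stepA acc part ≠ [] := by
  unfold stepA; split <;> simp

theorem foldl_stepA_ne_nil (l : List String) : ∀ acc : List String, acc ≠ [] →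
    l.foldl stepA acc ≠ [] := by
  induction l with
  | nil => intro acc h; exact h
  | cons part t ih => intro acc h; exact ih _ (stepA_ne_nil acc part h)

theorem foldl_stepA_cons_head (l : List String) : ∀ (p : String) (acc : List String), acc ≠ [] →
    l.foldl stepA (p :: acc) = p :: l.foldl stepA acc := by
  induction l with
  | nil => intro p acc _; rfl
  | cons part t ih =>
    intro p acc h
    obtain ⟨a, u, rfl⟩ : ∃ a u, acc = a :: u := by
      cases acc with
      | nil => exact absurd rfl h
      | cons a u => exact ⟨a, u, rfl⟩
    have hstep : stepA (p :: a :: u) part = p :: stepA (a :: u) part := by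
      unfold stepA
      by_cases hb : PySem.Chars.startswith part.toList ['['] = true
      · simp [PySem.Str.startswith, hb, List.getLast!, List.getLast]
      · simp [PySem.Str.startswith, hb]
    simp only [List.foldl_cons, hstep]
    exact ih p _ (stepA_ne_nil (a :: u) part (by simp))

theorem A_canon (rest : List String) : ∀ p : String,
    PySem.Str.join "." (rest.foldl stepA [p]) = p ++ sepTail rest := by
  induction rest with
  | nil => intro p; simp [sj_singleton, sepTail]
  | cons y t ih =>
    intro p
    by_cases hb : PySem.Chars.startswith y.toList ['['] = true
    · have hstep : stepA [p] y = [p ++ y] := by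
        unfold stepA; simp [PySem.Str.startswith, hb, List.getLast!]
      simp only [List.foldl_cons, hstep, ih]
      simp [sepTail, PySem.Str.startswith, hb, String.append_assoc]
    · have hstep : stepA [p] y = p :: [y] := by
        unfold stepA; simp [PySem.Str.startswith, hb]
      simp only [List.foldl_cons, hstep]
      rw [foldl_stepA_cons_head t p [y] (by simp),
          sj_cons p _ (foldl_stepA_ne_nil t [y] (by simp)), ih]
      simp [sepTail, PySem.Str.startswith, hb, String.append_assoc]

-- B's loop step (as a foldr after List.foldl_reverse)
def stepB (st : List String × Option Bool) (part : String) : List String × Option Bool :=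
  ((match st.2 with
    | some false => st.1 ++ ["."]
    | _ => st.1) ++ [part],
   some (PySem.Str.startswith part "["))

-- the pieces list B has accumulated after processing p :: rest right-to-left
def piecesFor (p : String) : List String → List String
  | [] => [p]
  | z :: t => piecesFor z t ++ (if PySem.Chars.startswith z.toList ['['] = true then [p] else [".", p])

theorem B_fold (rest : List String) : ∀ p : String,
    (p :: rest).foldr (fun part st => stepB st part) ([], none) =
      (piecesFor p rest, some (PySem.Str.startswith p "[")) := by
  induction rest with
  | nil => intro p; simp [stepB, piecesFor]
  | cons z t ih =>
    intro p
    have h : (p :: z :: t).foldr (fun part st => stepB st part) ([], none) =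
        stepB ((z :: t).foldr (fun part st => stepB st part) ([], none)) p := rfl
    rw [h, ih z]
    by_cases hb : PySem.Chars.startswith z.toList ['['] = true
    · simp [stepB, PySem.Str.startswith, hb, piecesFor]
    · simp [stepB, PySem.Str.startswith, hb, piecesFor]

theorem ej_cons (a : String) (l : List String) :
    PySem.Str.join "" (a :: l) = a ++ PySem.Str.join "" l := by
  rw [← String.toList_inj]
  cases l with
  | nil => simp [PySem.Str.toList_join, PySem.Chars.join_singleton, PySem.Chars.join_nil]
  | cons b t => simp [PySem.Str.toList_join, PySem.Chars.join_cons_cons]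

theorem join_pieces (rest : List String) : ∀ p : String,
    PySem.Str.join "" (piecesFor p rest).reverse = p ++ sepTail rest := by
  induction rest with
  | nil =>
    intro p
    rw [← String.toList_inj]
    simp [piecesFor, sepTail, PySem.Str.toList_join, PySem.Chars.join_singleton]
  | cons z t ih =>
    intro p
    by_cases hb : PySem.Chars.startswith z.toList ['['] = true
    · have h : (piecesFor p (z :: t)).reverse = p :: (piecesFor z t).reverse := by
        simp [piecesFor, hb]
      rw [h, ej_cons, ih z]
      simp [sepTail, hb]
    · have h : (piecesFor p (z :: t)).reverse = p :: "." :: (piecesFor z t).reverse := by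
        simp [piecesFor, hb]
      rw [h, ej_cons, ej_cons, ih z]
      simp [sepTail, hb, String.append_assoc]

-- ===== VERDICT (by name: the statement is the Claim_ definition above) =====
theorem format_proto_path_py_spec : Claim_equal_format_proto_path_py := by
  intro parts _
  unfold Spec_format_proto_path_py format_proto_path_py format_proto_path_py_alt
  cases parts with
  | nil => rfl
  | cons p rest =>
    have hB : PySem.Str.join "" (((p :: rest).reverse.foldl stepB ([], none)).1.reverse)
        = p ++ sepTail rest := by
      rw [List.foldl_reverse]
      have h2 : (p :: rest).foldr (fun x y => stepB y x) ([], none)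
          = (piecesFor p rest, some (PySem.Str.startswith p "[")) := B_fold rest p
      rw [h2]
      exact join_pieces rest p
    simp only [List.isEmpty_cons, if_neg (by simp : ¬ (false = true)), List.foldl_cons]
    have h0 : (if PySem.Str.startswith p "[" && !([] : List String).isEmpty then
          ([] : List String).dropLast ++ [([] : List String).getLast! ++ p]
        else ([] : List String) ++ [p]) = [p] := by simp
    rw [h0]
    have hA : PySem.Str.join "." (rest.foldl (fun formatted part =>
        if PySem.Str.startswith part "[" && !formatted.isEmpty then
          formatted.dropLast ++ [formatted.getLast! ++ part]
        else formatted ++ [part]) [p]) = p ++ sepTail rest := by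
      have := A_canon rest p
      unfold stepA at this
      exact this
    rw [hA, ← hB]
    rfl
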